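-- pv_equiv track=rewrite | github.com/heima641/ClearlyAgentic_forClients | heygen_2p_script_chunker_automation.py | comment_out_non_audio_segments
-- ===== SOURCE A (Python) =====
-- def comment_out_non_audio_segments(chunked_content: str) -> str:
--     """
--     SURGICAL commenting: Only comment out specific non-audio segments.
--     INPUT: Clean content with NO existing # prefixes
--     OUTPUT: Mostly clean content with ONLY targeted lines commented out
--
--     This function identifies and comments out:
--     1. Section markers like **[Intro]**, **[Outro]**, **[Transition]**
--     2. Final synopsis section (only after the LAST '---' separator)
--
--     Args:
--         chunked_content (str): The chunked script content
--
--     Returns: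
--         str: Content with non-audio segments commented out
--     """
--
--     lines = chunked_content.split('\n')
--     processed_lines = []
--
--     # FIND THE FINAL '---' - only content after THIS should be synopsis
--     last_separator_index = -1
--     for i, line in enumerate(lines):
--         if line.strip() == '---':
--             last_separator_index = i
--
--     for i, line in enumerate(lines):
--         line_stripped = line.strip()
--
--         # Always keep separators and empty lines as-is
--         if not line_stripped or line_stripped == '---':
--             processed_lines.append(line)
--             continue
--
--         # Only comment content after the FINAL '---' AND skip chunking summary lines
--         in_final_synopsis = (last_separator_index != -1 and i > last_separator_index)
--         if in_final_synopsis: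
--             # Don't double-comment lines that are already chunking metadata
--             if line_stripped.startswith('# '):
--                 processed_lines.append(line)  # Keep existing metadata comments
--             else:
--                 processed_lines.append(f"# {line}")  # Comment out synopsis prose
--             continue
--
--         # Comment out ONLY specific section markers (exact matches only)
--         markers_to_comment = [
--             '**Intro (', '**INTRO (',
--             '**Outro (', '**OUTRO (',
--             '**Transition (', '**TRANSITION (',
--             '**[Intro]**', '**[INTRO]**', '[INTRO]', '[intro]',
--             '**[Outro]**', '**[OUTRO]**', '[OUTRO]', '[outro]',
--             '**[Transition]**', '**[TRANSITION]**', '[TRANSITION]', '[transition]'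
--         ]
--
--         should_comment = any(marker in line_stripped for marker in markers_to_comment)
--
--         if should_comment:
--             processed_lines.append(f"# {line}")  # Comment out section markers
--         else:
--             processed_lines.append(line)  # ✅ KEEP ALL OTHER CONTENT CLEAN FOR SPEAKING
--
--     return '\n'.join(processed_lines)
-- ===== SOURCE B (Python) =====
-- MARKERS = ('**Intro (', '**INTRO (', '**Outro (', '**OUTRO (',
--            '**Transition (', '**TRANSITION (',
--            '**[Intro]**', '**[INTRO]**', '[INTRO]', '[intro]',
--            '**[Outro]**', '**[OUTRO]**', '[OUTRO]', '[outro]',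
--            '**[Transition]**', '**[TRANSITION]**', '[TRANSITION]', '[transition]')
--
--
-- def comment_out_non_audio_segments(chunked_content: str) -> str:
--     # Single reverse pass with a state machine, output built back-to-front:
--     # start in synopsis mode iff any '---' line exists; the first '---' met while
--     # scanning backwards (= the last separator) switches permanently to marker mode.
--     lines = chunked_content.split('\n')
--     in_synopsis = any(l.strip() == '---' for l in lines)
--     out = []
--     for line in reversed(lines):
--         s = line.strip()
--         if s == '':
--             out.append(line)
--         elif s == '---':
--             out.append(line)
--             in_synopsis = False
--         elif in_synopsis:
--             out.append(line if s.startswith('# ') else '# ' + line)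
--         elif any(m in s for m in MARKERS):
--             out.append('# ' + line)
--         else:
--             out.append(line)
--     return '\n'.join(reversed(out))
-- ===== Notes on version B (the rewrite author's own statement) =====
-- stated objective: alternative
-- what changed: B replaces A's index arithmetic (find the last separator's index, then compare every line's position against it in a second forward loop) by a single reverse pass: a two-mode state machine scans the lines back-to-front, starting in synopsis mode iff a '---' line exists at all (a membership test, no index), flipping permanently to marker mode at the first '---' met, and builds the output list back-to-front before one final reverse.
import Mathlib
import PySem

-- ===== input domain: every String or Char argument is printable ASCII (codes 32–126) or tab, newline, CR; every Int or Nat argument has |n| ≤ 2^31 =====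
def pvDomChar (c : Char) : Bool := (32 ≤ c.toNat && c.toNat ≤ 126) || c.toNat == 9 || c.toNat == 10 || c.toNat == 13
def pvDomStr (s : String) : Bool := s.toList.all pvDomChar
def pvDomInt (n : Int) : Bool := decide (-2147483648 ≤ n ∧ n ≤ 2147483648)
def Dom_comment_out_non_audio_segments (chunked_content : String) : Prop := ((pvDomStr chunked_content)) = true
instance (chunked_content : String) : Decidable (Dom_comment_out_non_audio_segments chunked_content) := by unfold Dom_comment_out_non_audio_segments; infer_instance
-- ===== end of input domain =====

-- B replaces A's two forward loops with index arithmetic by a single reverse pass: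
-- a two-mode state machine over the reversed lines (synopsis mode iff a '---' line
-- exists, flipped permanently at the first '---' met) building the output back-to-front.

-- the fixed marker list (shared constant of both programs)
def pvMarkers : List String :=
  ["**Intro (", "**INTRO (", "**Outro (", "**OUTRO (",
   "**Transition (", "**TRANSITION (",
   "**[Intro]**", "**[INTRO]**", "[INTRO]", "[intro]",
   "**[Outro]**", "**[OUTRO]**", "[OUTRO]", "[outro]",
   "**[Transition]**", "**[TRANSITION]**", "[TRANSITION]", "[transition]"]

-- ===== PORT A =====
-- chunked_content.split('\n') with the nonempty literal separator: split? never returns none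
def comment_out_non_audio_segments (chunked_content : String) : String :=
  let lines := (PySem.Str.split? chunked_content "\n").getD []
  -- for i, line in enumerate(lines): if line.strip() == '---': last_separator_index = i
  let last_separator_index : Int :=
    (PySem.List.enumerate lines 0).foldl
      (fun acc p => if PySem.Str.strip p.2 == "---" then p.1 else acc) (-1)
  let processed_lines : List String :=
    (PySem.List.enumerate lines 0).foldl
      (fun acc p =>
        let line := p.2
        let line_stripped := PySem.Str.strip line
        if line_stripped == "" || line_stripped == "---" then acc ++ [line]
        else if last_separator_index ≠ -1 ∧ p.1 > last_separator_index then
          (if PySem.Str.startswith line_stripped "# " then acc ++ [line]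
           else acc ++ ["# " ++ line])
        else if pvMarkers.any (fun m => PySem.Str.isIn m line_stripped) then acc ++ ["# " ++ line]
        else acc ++ [line]) []
  PySem.Str.join "\n" processed_lines

-- ===== PORT B =====
-- the body of Source B's reverse loop: state = (out list so far, in_synopsis flag)
def pvBStep (st : List String × Bool) (line : String) : List String × Bool :=
  let s := PySem.Str.strip line
  if s == "" then (st.1 ++ [line], st.2)
  else if s == "---" then (st.1 ++ [line], false)
  else if st.2 then
    (st.1 ++ [if PySem.Str.startswith s "# " then line else "# " ++ line], st.2)
  else if pvMarkers.any (fun m => PySem.Str.isIn m s) then (st.1 ++ ["# " ++ line], st.2)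
  else (st.1 ++ [line], st.2)

def comment_out_non_audio_segments_alt (chunked_content : String) : String :=
  let lines := (PySem.Str.split? chunked_content "\n").getD []
  let in_synopsis := lines.any (fun l => PySem.Str.strip l == "---")
  let st := lines.reverse.foldl pvBStep ([], in_synopsis)
  PySem.Str.join "\n" st.1.reverse

-- ===== PRECONDITION & SPEC =====
def Spec_comment_out_non_audio_segments (chunked_content : String) (out : String) : Prop := out = comment_out_non_audio_segments_alt chunked_content
instance (chunked_content : String) (out : String) : Decidable (Spec_comment_out_non_audio_segments chunked_content out) := by unfold Spec_comment_out_non_audio_segments; infer_instance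

-- ===== CLAIM (what is proved, stated in full; the proofs are below) =====
def Claim_equal_comment_out_non_audio_segments : Prop := ∀ (chunked_content : String), Dom_comment_out_non_audio_segments chunked_content → Spec_comment_out_non_audio_segments chunked_content (comment_out_non_audio_segments chunked_content)

-- ===== LEMMAS AND PROOFS =====

-- abbreviation used only in the proofs: is the stripped line exactly '---'?
def pvIsSep (l : String) : Bool := PySem.Str.strip l == "---"

-- B's per-line result in marker (head) mode
def pvHead (l : String) : String :=
  if PySem.Str.strip l == "" then l
  else if PySem.Str.strip l == "---" then l
  else if pvMarkers.any (fun m => PySem.Str.isIn m (PySem.Str.strip l)) then "# " ++ l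
  else l

-- B's per-line result in synopsis mode (for lines that do not strip to '---')
def pvSyn (l : String) : String :=
  if PySem.Str.strip l == "" then l
  else if PySem.Str.startswith (PySem.Str.strip l) "# " then l
  else "# " ++ l

-- the per-line function of A's main loop, with the separator index fixed
def pvFA (lsi : Int) (i : Int) (l : String) : String :=
  if PySem.Str.strip l == "" || PySem.Str.strip l == "---" then l
  else if lsi ≠ -1 ∧ i > lsi then
    (if PySem.Str.startswith (PySem.Str.strip l) "# " then l else "# " ++ l)
  else if pvMarkers.any (fun m => PySem.Str.isIn m (PySem.Str.strip l)) then "# " ++ l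
  else l

theorem pvFA_eq_head (lsi i : Int) (l : String) (h : ¬ (lsi ≠ -1 ∧ i > lsi)) :
    pvFA lsi i l = pvHead l := by
  unfold pvFA pvHead
  by_cases h0 : PySem.Str.strip l = ""
  · simp [h0]
  · by_cases h1 : PySem.Str.strip l = "---"
    · simp [h1]
    · simp [h0, h1, h]

theorem pvFA_eq_syn (lsi i : Int) (l : String) (h : lsi ≠ -1 ∧ i > lsi)
    (hsep : ¬ PySem.Str.strip l = "---") :
    pvFA lsi i l = pvSyn l := by
  unfold pvFA pvSyn
  by_cases h0 : PySem.Str.strip l = ""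
  · simp [h0]
  · simp [h0, hsep, h]

theorem pv_map_enumerate_congr {α β : Type} (xs : List α) (s : Int)
    (F : Int × α → β) (G : α → β)
    (h : ∀ (j : Nat) (hj : j < xs.length), F (s + (j : Int), xs[j]) = G xs[j]) :
    (PySem.List.enumerate xs s).map F = xs.map G := by
  apply List.ext_getElem
  · simp [PySem.List.length_enumerate]
  · intro j h1 h2
    have hj : j < xs.length := by simpa using h2
    simp only [List.getElem_map, PySem.List.getElem_enumerate]
    exact h j hj

-- A's main loop is a map of pvFA over the enumerated lines
theorem pvA_eq_map (c : String) :
    comment_out_non_audio_segments c =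
      PySem.Str.join "\n"
        ((PySem.List.enumerate ((PySem.Str.split? c "\n").getD []) 0).map
          (fun p => pvFA
            ((PySem.List.enumerate ((PySem.Str.split? c "\n").getD []) 0).foldl
              (fun acc p => if PySem.Str.strip p.2 == "---" then p.1 else acc) (-1))
            p.1 p.2)) := by
  simp only [comment_out_non_audio_segments]
  rw [show
    (fun (acc : List String) (p : Int × String) =>
        if PySem.Str.strip p.2 == "" || PySem.Str.strip p.2 == "---" then acc ++ [p.2]
        else if ((PySem.List.enumerate ((PySem.Str.split? c "\n").getD []) 0).foldl
                  (fun acc p => if PySem.Str.strip p.2 == "---" then p.1 else acc) (-1)) ≠ -1 ∧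
                p.1 > ((PySem.List.enumerate ((PySem.Str.split? c "\n").getD []) 0).foldl
                  (fun acc p => if PySem.Str.strip p.2 == "---" then p.1 else acc) (-1)) then
          (if PySem.Str.startswith (PySem.Str.strip p.2) "# " then acc ++ [p.2]
           else acc ++ ["# " ++ p.2])
        else if pvMarkers.any (fun m => PySem.Str.isIn m (PySem.Str.strip p.2)) then
          acc ++ ["# " ++ p.2]
        else acc ++ [p.2]) =
      (fun (acc : List String) (p : Int × String) =>
        acc ++ [pvFA
          ((PySem.List.enumerate ((PySem.Str.split? c "\n").getD []) 0).foldl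
            (fun acc p => if PySem.Str.strip p.2 == "---" then p.1 else acc) (-1)) p.1 p.2])
    from by
      funext acc p
      unfold pvFA
      split_ifs <;> rfl]
  rw [PySem.List.foldl_append_singleton_eq_map, List.nil_append]

-- characterisation of A's last-separator fold: untouched accumulator (no hit) or the LAST hit
theorem pvLastIdx_spec (xs : List String) : ∀ (s a : Int),
    ((PySem.List.enumerate xs s).foldl
        (fun acc p => if PySem.Str.strip p.2 == "---" then p.1 else acc) a = a ∧
      ∀ j, j < xs.length → pvIsSep (xs.getD j "") = false) ∨
    (∃ k : Nat, k < xs.length ∧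
      (PySem.List.enumerate xs s).foldl
        (fun acc p => if PySem.Str.strip p.2 == "---" then p.1 else acc) a = s + (k : Int) ∧
      pvIsSep (xs.getD k "") = true ∧
      ∀ j, k < j → j < xs.length → pvIsSep (xs.getD j "") = false) := by
  induction xs with
  | nil =>
    intro s a
    left
    constructor
    · simp [PySem.List.enumerate_nil]
    · intro j hj
      simp at hj
  | cons x xs ih =>
    intro s a
    rw [PySem.List.enumerate_cons]
    simp only [List.foldl_cons]
    rcases ih (s + 1) (if PySem.Str.strip x == "---" then s else a) with
      ⟨hr, hall⟩ | ⟨k, hk, hr, hP, hmax⟩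
    · by_cases hx : PySem.Str.strip x == "---"
      · right
        refine ⟨0, by simp, ?_, by simpa [pvIsSep] using hx, ?_⟩
        · rw [hr]
          simp [hx]
        · intro j hj hjlen
          obtain ⟨j', rfl⟩ : ∃ j', j = j' + 1 := ⟨j - 1, by omega⟩
          have hj' : j' < xs.length := by
            simp only [List.length_cons] at hjlen
            omega
          simpa using hall j' hj'
      · left
        refine ⟨by rw [hr]; simp [hx], ?_⟩
        intro j hjlen
        cases j with
        | zero => simpa [pvIsSep] using hx
        | succ j' =>
          have hj' : j' < xs.length := by
            simp only [List.length_cons] at hjlen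
            omega
          simpa using hall j' hj'
    · right
      refine ⟨k + 1, by simp only [List.length_cons]; omega, ?_, by simpa using hP, ?_⟩
      · rw [hr]
        push_cast
        ring
      · intro j hj hjlen
        obtain ⟨j', rfl⟩ : ∃ j', j = j' + 1 := ⟨j - 1, by omega⟩
        have hj' : j' < xs.length := by
          simp only [List.length_cons] at hjlen
          omega
        simpa using hmax j' (by omega) hj'

-- B's loop from marker mode: state stays false, every line gets the head treatment
theorem pvB_foldl_false (R : List String) : ∀ (acc : List String),
    R.foldl pvBStep (acc, false) = (acc ++ R.map pvHead, false) := by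
  induction R with
  | nil => intro acc; simp
  | cons x xs ih =>
    intro acc
    have hstep : pvBStep (acc, false) x = (acc ++ [pvHead x], false) := by
      unfold pvBStep pvHead
      split_ifs <;> simp_all
    rw [List.foldl_cons, hstep, ih]
    simp

-- B's loop from synopsis mode over separator-free lines: state stays true, synopsis treatment
theorem pvB_foldl_true (R : List String) : ∀ (acc : List String),
    (∀ l ∈ R, ¬ PySem.Str.strip l = "---") →
    R.foldl pvBStep (acc, true) = (acc ++ R.map pvSyn, true) := by
  induction R with
  | nil => intro acc _; simp
  | cons x xs ih =>
    intro acc h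
    have hx : ¬ PySem.Str.strip x = "---" := h x (by simp)
    have hstep : pvBStep (acc, true) x = (acc ++ [pvSyn x], true) := by
      unfold pvBStep pvSyn
      split_ifs <;> simp_all
    rw [List.foldl_cons, hstep, ih _ (fun l hl => h l (by simp [hl]))]
    simp

-- ===== VERDICT (by name: the statement is the Claim_ definition above) =====
set_option maxHeartbeats 1000000 in
theorem comment_out_non_audio_segments_spec : Claim_equal_comment_out_non_audio_segments := by
  unfold Claim_equal_comment_out_non_audio_segments
  intro c _
  unfold Spec_comment_out_non_audio_segments
  rw [pvA_eq_map]
  simp only [comment_out_non_audio_segments_alt]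
  set L := (PySem.Str.split? c "\n").getD [] with hLdef
  rcases pvLastIdx_spec L 0 (-1) with ⟨hrA, hallA⟩ | ⟨k, hk, hrA, hPA, hmaxA⟩
  · -- no separator anywhere: B starts (and stays) in marker mode
    have hany : (L.any fun l => PySem.Str.strip l == "---") = false := by
      rw [List.any_eq_false]
      intro l hl
      obtain ⟨j, hj, rfl⟩ := List.mem_iff_getElem.mp hl
      have := hallA j hj
      rw [List.getD_eq_getElem L "" hj] at this
      simpa [pvIsSep] using this
    rw [hany, hrA, pvB_foldl_false]
    simp only [List.nil_append, List.map_reverse, List.reverse_reverse]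
    refine congrArg (PySem.Str.join "\n") ?_
    apply pv_map_enumerate_congr
    intro j hj
    exact pvFA_eq_head _ _ _ (by simp)
  · -- separator at last index k: B starts in synopsis mode, flips at L[k]
    have hPk : PySem.Str.strip (L[k]'hk) = "---" := by
      have h1 := hPA
      rw [List.getD_eq_getElem L "" hk] at h1
      simpa [pvIsSep] using h1
    have hany : (L.any fun l => PySem.Str.strip l == "---") = true := by
      rw [List.any_eq_true]
      exact ⟨L[k]'hk, List.getElem_mem hk, by simp [hPk]⟩
    have hdecomp : L = L.take k ++ (L[k]'hk) :: L.drop (k + 1) := by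
      conv_lhs => rw [← List.take_append_drop k L, List.drop_eq_getElem_cons hk]
    have hlen_take : (L.take k).length = k := by
      simp only [List.length_take]
      omega
    -- B side
    have hnosepU : ∀ l ∈ (L.drop (k + 1)).reverse, ¬ PySem.Str.strip l = "---" := by
      intro l hl
      rw [List.mem_reverse] at hl
      obtain ⟨j, hj, rfl⟩ := List.mem_iff_getElem.mp hl
      have hjlen : k + 1 + j < L.length := by
        simp only [List.length_drop] at hj
        omega
      have h2 := hmaxA (k + 1 + j) (by omega) hjlen
      rw [List.getD_eq_getElem L "" hjlen] at h2
      simp only [pvIsSep, beq_eq_false_iff_ne, ne_eq] at h2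
      simpa [List.getElem_drop] using h2
    have hsepstep : ∀ acc : List String,
        pvBStep (acc, true) (L[k]'hk) = (acc ++ [L[k]'hk], false) := by
      intro acc
      unfold pvBStep
      rw [hPk]
      simp
    have hB : (L.reverse.foldl pvBStep ([], true)).1.reverse =
        (L.take k).map pvHead ++ (L[k]'hk) :: (L.drop (k + 1)).map pvSyn := by
      conv_lhs => rw [hdecomp]
      rw [List.reverse_append, List.reverse_cons, List.append_assoc,
        List.foldl_append, pvB_foldl_true _ _ hnosepU, List.foldl_append,
        List.foldl_cons, List.foldl_nil, hsepstep, pvB_foldl_false]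
      simp
    rw [hany, hrA, hB]
    -- A side
    conv_lhs =>
      rw [show L = L.take k ++ (L[k]'hk) :: L.drop (k + 1) from hdecomp]
    rw [PySem.List.enumerate_append, PySem.List.enumerate_cons, List.map_append, List.map_cons,
      hlen_take, zero_add]
    refine congrArg (PySem.Str.join "\n") ?_
    rw [List.append_cons, List.append_cons ((L.take k).map pvHead)]
    refine congrArg₂ (· ++ ·) (congrArg₂ (· ++ ·) ?_ ?_) ?_
    · -- head slice: indices below the separator
      apply pv_map_enumerate_congr
      intro j hj
      apply pvFA_eq_head
      rintro ⟨-, hgt⟩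
      rw [hlen_take] at hj
      omega
    · -- the separator line itself is emitted verbatim by both
      refine congrArg (fun x => [x]) ?_
      unfold pvFA
      rw [hPk]
      simp
    · -- tail slice: indices above the separator
      apply pv_map_enumerate_congr
      intro j hj
      have hjlen : k + 1 + j < L.length := by
        simp only [List.length_drop] at hj
        omega
      have h2 := hmaxA (k + 1 + j) (by omega) hjlen
      rw [List.getD_eq_getElem L "" hjlen] at h2
      simp only [pvIsSep, beq_eq_false_iff_ne, ne_eq] at h2
      apply pvFA_eq_syn
      · exact ⟨by simp, by push_cast; omega⟩
      · simpa [List.getElem_drop] using h2
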